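-- pv_equiv track=rewrite | github.com/FAnzTvDev/ATLAS_CONTROL_SYSTEM | atlas_agents_v16_7/atlas_agents/continuity_state_enricher.py | extract_emotion_intensity
-- ===== SOURCE A (Python) =====
-- def extract_emotion_intensity(beat_description: str, dialogue: str = "",
--                              previous_intensity: int = 5) -> int:
--     """
--     Extract emotion intensity (0-10 scale) from beat + dialogue.
--     0-2: calm, composed, neutral
--     3-4: mild concern, slight worry
--     5: neutral/balanced
--     6-7: strong emotion, visible impact
--     8-9: extreme emotion, breaking composure
--     10: maximum intensity (rage, terror, etc.)
--     """
--     text = (beat_description + " " + dialogue).lower()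
--
--     # Extreme keywords → intensity 9-10
--     extreme_words = ["terror", "terror", "horrified", "devastated", "ecstatic", "enraged"]
--     if any(w in text for w in extreme_words):
--         return 10
--
--     # Strong keywords → intensity 7-8
--     strong_words = ["tears", "trembles", "shakes", "gasps", "rage", "fury", "despair", "grief"]
--     if any(w in text for w in strong_words):
--         return 8
--
--     # Medium keywords → intensity 6-7
--     medium_words = ["sad", "angry", "worried", "afraid", "hope", "joy", "surprised", "shocked"]
--     if any(w in text for w in medium_words):
--         return 6
--
--     # Mild keywords → intensity 3-4
--     mild_words = ["concerned", "unsure", "hesitant", "nervous", "slight", "faint"]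
--     if any(w in text for w in mild_words):
--         return 4
--
--     # Calm keywords → intensity 0-2
--     calm_words = ["calm", "peaceful", "serene", "composed", "tranquil", "quiet"]
--     if any(w in text for w in calm_words):
--         return 1
--
--     return previous_intensity
-- ===== SOURCE B (Python) =====
-- _INTENSITY = {
--     "terror": 10, "horrified": 10, "devastated": 10, "ecstatic": 10, "enraged": 10,
--     "tears": 8, "trembles": 8, "shakes": 8, "gasps": 8, "rage": 8, "fury": 8, "despair": 8, "grief": 8,
--     "sad": 6, "angry": 6, "worried": 6, "afraid": 6, "hope": 6, "joy": 6, "surprised": 6, "shocked": 6,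
--     "concerned": 4, "unsure": 4, "hesitant": 4, "nervous": 4, "slight": 4, "faint": 4,
--     "calm": 1, "peaceful": 1, "serene": 1, "composed": 1, "tranquil": 1, "quiet": 1,
-- }
--
-- def extract_emotion_intensity(beat_description: str, dialogue: str = "",
--                               previous_intensity: int = 5) -> int:
--     text = (beat_description + " " + dialogue).lower()
--     matched = [v for w, v in _INTENSITY.items() if w in text]
--     return max(matched) if matched else previous_intensity
-- ===== Notes on version B (the rewrite author's own statement) =====
-- stated objective: idiomatic
-- what changed: Replaces A's five-tier early-return cascade of any() checks with a single keyword-to-intensity dict scanned once, returning the max matched intensity (or previous_intensity if nothing matched); equivalent because intensity decreases monotonically with tier priority.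
import Mathlib
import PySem

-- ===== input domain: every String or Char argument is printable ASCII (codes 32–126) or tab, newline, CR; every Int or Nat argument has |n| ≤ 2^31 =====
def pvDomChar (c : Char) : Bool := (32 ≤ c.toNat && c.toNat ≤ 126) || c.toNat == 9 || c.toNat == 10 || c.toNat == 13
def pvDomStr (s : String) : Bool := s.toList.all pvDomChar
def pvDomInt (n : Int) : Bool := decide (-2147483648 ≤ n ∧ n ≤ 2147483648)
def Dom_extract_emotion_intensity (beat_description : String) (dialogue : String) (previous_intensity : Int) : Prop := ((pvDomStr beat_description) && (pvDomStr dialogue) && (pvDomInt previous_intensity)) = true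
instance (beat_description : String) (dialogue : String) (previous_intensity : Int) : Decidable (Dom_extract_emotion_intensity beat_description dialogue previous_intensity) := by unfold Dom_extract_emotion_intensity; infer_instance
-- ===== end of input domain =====

-- B replaces A's five-tier early-return cascade by one keyword→intensity table scanned once
-- with a max-reduction (idiomatic; equivalent because intensity decreases with tier priority).

-- ===== PORT A =====
def extract_emotion_intensity (beat_description : String) (dialogue : String) (previous_intensity : Int) : Int :=
  let text := PySem.Chars.lower (beat_description.toList ++ [' '] ++ dialogue.toList)
  if (["terror".toList, "terror".toList, "horrified".toList, "devastated".toList, "ecstatic".toList, "enraged".toList]).any (fun w => PySem.Chars.isIn w text) then 10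
  else if (["tears".toList, "trembles".toList, "shakes".toList, "gasps".toList, "rage".toList, "fury".toList, "despair".toList, "grief".toList]).any (fun w => PySem.Chars.isIn w text) then 8
  else if (["sad".toList, "angry".toList, "worried".toList, "afraid".toList, "hope".toList, "joy".toList, "surprised".toList, "shocked".toList]).any (fun w => PySem.Chars.isIn w text) then 6
  else if (["concerned".toList, "unsure".toList, "hesitant".toList, "nervous".toList, "slight".toList, "faint".toList]).any (fun w => PySem.Chars.isIn w text) then 4
  else if (["calm".toList, "peaceful".toList, "serene".toList, "composed".toList, "tranquil".toList, "quiet".toList]).any (fun w => PySem.Chars.isIn w text) then 1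
  else previous_intensity

-- ===== PORT B =====
-- the keyword→intensity dict of Source B, as an association list in insertion order
def pvIntensityTable : List (List Char × Int) :=
  [("terror".toList, 10), ("horrified".toList, 10), ("devastated".toList, 10), ("ecstatic".toList, 10), ("enraged".toList, 10),
   ("tears".toList, 8), ("trembles".toList, 8), ("shakes".toList, 8), ("gasps".toList, 8), ("rage".toList, 8), ("fury".toList, 8), ("despair".toList, 8), ("grief".toList, 8),
   ("sad".toList, 6), ("angry".toList, 6), ("worried".toList, 6), ("afraid".toList, 6), ("hope".toList, 6), ("joy".toList, 6), ("surprised".toList, 6), ("shocked".toList, 6),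
   ("concerned".toList, 4), ("unsure".toList, 4), ("hesitant".toList, 4), ("nervous".toList, 4), ("slight".toList, 4), ("faint".toList, 4),
   ("calm".toList, 1), ("peaceful".toList, 1), ("serene".toList, 1), ("composed".toList, 1), ("tranquil".toList, 1), ("quiet".toList, 1)]

def extract_emotion_intensity_alt (beat_description : String) (dialogue : String) (previous_intensity : Int) : Int :=
  let text := PySem.Chars.lower (beat_description.toList ++ [' '] ++ dialogue.toList)
  let matched := (pvIntensityTable.filter (fun kv => PySem.Chars.isIn kv.1 text)).map Prod.snd
  match PySem.List.max? matched (fun v => v) with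
  | some m => m
  | none => previous_intensity

-- ===== PRECONDITION & SPEC =====
def Spec_extract_emotion_intensity (beat_description : String) (dialogue : String) (previous_intensity : Int) (out : Int) : Prop := out = extract_emotion_intensity_alt beat_description dialogue previous_intensity
instance (beat_description : String) (dialogue : String) (previous_intensity : Int) (out : Int) : Decidable (Spec_extract_emotion_intensity beat_description dialogue previous_intensity out) := by unfold Spec_extract_emotion_intensity; infer_instance

-- ===== CLAIM (what is proved, stated in full; the proofs are below) =====
def Claim_equal_extract_emotion_intensity : Prop := ∀ (beat_description : String) (dialogue : String) (previous_intensity : Int), Dom_extract_emotion_intensity beat_description dialogue previous_intensity → Spec_extract_emotion_intensity beat_description dialogue previous_intensity (extract_emotion_intensity beat_description dialogue previous_intensity)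

-- ===== LEMMAS AND PROOFS =====

-- the five tiers of keywords, proof-side names
def pvT10 : List (List Char) := ["terror".toList, "horrified".toList, "devastated".toList, "ecstatic".toList, "enraged".toList]
def pvT8 : List (List Char) := ["tears".toList, "trembles".toList, "shakes".toList, "gasps".toList, "rage".toList, "fury".toList, "despair".toList, "grief".toList]
def pvT6 : List (List Char) := ["sad".toList, "angry".toList, "worried".toList, "afraid".toList, "hope".toList, "joy".toList, "surprised".toList, "shocked".toList]
def pvT4 : List (List Char) := ["concerned".toList, "unsure".toList, "hesitant".toList, "nervous".toList, "slight".toList, "faint".toList]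
def pvT1 : List (List Char) := ["calm".toList, "peaceful".toList, "serene".toList, "composed".toList, "tranquil".toList, "quiet".toList]

-- the table is the concatenation of the tiers, each tagged with its intensity
lemma pvTable_eq : pvIntensityTable =
    pvT10.map (fun w => (w, (10 : Int))) ++ pvT8.map (fun w => (w, (8 : Int))) ++
    pvT6.map (fun w => (w, (6 : Int))) ++ pvT4.map (fun w => (w, (4 : Int))) ++
    pvT1.map (fun w => (w, (1 : Int))) := rfl

-- filtering a tagged tier and projecting the tags
lemma pvTier_part (pred : List Char → Bool) (T : List (List Char)) (k : Int) :
    ((T.map (fun w => (w, k))).filter (fun kv => pred kv.1)).map Prod.snd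
      = (T.filter pred).map (fun _ => k) := by
  rw [List.filter_map, List.map_map]
  rfl

lemma pvPart_nil {pred : List Char → Bool} {T : List (List Char)} (h : T.any pred = false) (k : Int) :
    (T.filter pred).map (fun _ => k) = [] := by
  simp only [List.any_eq_false] at h
  rw [List.filter_eq_nil_iff.mpr (by intro x hx; exact h x hx)]
  rfl

lemma pvPart_mem {pred : List Char → Bool} {T : List (List Char)} (h : T.any pred = true) (k : Int) :
    k ∈ (T.filter pred).map (fun _ => k) := by
  rcases List.any_eq_true.mp h with ⟨w, hw, hp⟩
  exact List.mem_map.mpr ⟨w, List.mem_filter.mpr ⟨hw, hp⟩, rfl⟩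

lemma pvPart_le {pred : List Char → Bool} {T : List (List Char)} {k c : Int} (hk : k ≤ c) :
    ∀ x ∈ (T.filter pred).map (fun _ => k), x ≤ c := by
  intro x hx
  rcases List.mem_map.mp hx with ⟨w, _, rfl⟩
  exact hk

-- max? with identity key returns the maximum when it is attained
lemma pvMax?_eq {l : List Int} {c : Int} (hc : c ∈ l) (hle : ∀ x ∈ l, x ≤ c) :
    PySem.List.max? l (fun v => v) = some c := by
  cases hm : PySem.List.max? l (fun v => v) with
  | none => exact absurd ((PySem.List.max?_eq_none_iff l _).mp hm ▸ hc) (List.not_mem_nil)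
  | some m =>
    have h1 : m ≤ c := hle m (PySem.List.max?_mem hm)
    have h2 : c ≤ m := PySem.List.max?_isMax hm c hc
    exact congrArg some (le_antisymm h1 h2)

-- the heart of the equivalence: cascade = table-max, for any substring predicate
lemma pvCascade_eq (pred : List Char → Bool) (p : Int) :
    (if ("terror".toList :: pvT10).any pred then (10 : Int)
     else if pvT8.any pred then 8
     else if pvT6.any pred then 6
     else if pvT4.any pred then 4
     else if pvT1.any pred then 1
     else p)
      = match PySem.List.max? ((pvIntensityTable.filter (fun kv => pred kv.1)).map Prod.snd) (fun v => v) with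
        | some m => m
        | none => p := by
  have hdup : ("terror".toList :: pvT10).any pred = pvT10.any pred := by
    cases h : pred "terror".toList <;> simp [pvT10, List.any_cons]
  rw [hdup, pvTable_eq]
  simp only [List.filter_append, List.map_append, pvTier_part]
  by_cases h10 : pvT10.any pred = true
  · rw [if_pos h10, pvMax?_eq (c := 10)
      (by simp only [List.mem_append]; exact Or.inl (Or.inl (Or.inl (Or.inl (pvPart_mem h10 10)))))
      (by intro x hx
          simp only [List.mem_append] at hx
          rcases hx with ((((h | h) | h) | h) | h)
          exacts [pvPart_le (by norm_num) x h, pvPart_le (by norm_num) x h,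
                  pvPart_le (by norm_num) x h, pvPart_le (by norm_num) x h,
                  pvPart_le (by norm_num) x h])]
  · rw [if_neg h10, pvPart_nil (Bool.eq_false_iff.mpr h10) 10]
    by_cases h8 : pvT8.any pred = true
    · rw [if_pos h8, pvMax?_eq (c := 8)
        (by simp only [List.nil_append, List.mem_append]; exact Or.inl (Or.inl (Or.inl (pvPart_mem h8 8))))
        (by intro x hx
            simp only [List.nil_append, List.mem_append] at hx
            rcases hx with (((h | h) | h) | h)
            exacts [pvPart_le (by norm_num) x h, pvPart_le (by norm_num) x h,
                    pvPart_le (by norm_num) x h, pvPart_le (by norm_num) x h])]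
    · rw [if_neg h8, pvPart_nil (Bool.eq_false_iff.mpr h8) 8]
      by_cases h6 : pvT6.any pred = true
      · rw [if_pos h6, pvMax?_eq (c := 6)
          (by simp only [List.nil_append, List.mem_append]; exact Or.inl (Or.inl (pvPart_mem h6 6)))
          (by intro x hx
              simp only [List.nil_append, List.mem_append] at hx
              rcases hx with ((h | h) | h)
              exacts [pvPart_le (by norm_num) x h, pvPart_le (by norm_num) x h,
                      pvPart_le (by norm_num) x h])]
      · rw [if_neg h6, pvPart_nil (Bool.eq_false_iff.mpr h6) 6]
        by_cases h4 : pvT4.any pred = true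
        · rw [if_pos h4, pvMax?_eq (c := 4)
            (by simp only [List.nil_append, List.mem_append]; exact Or.inl (pvPart_mem h4 4))
            (by intro x hx
                simp only [List.nil_append, List.mem_append] at hx
                rcases hx with (h | h)
                exacts [pvPart_le (by norm_num) x h, pvPart_le (by norm_num) x h])]
        · rw [if_neg h4, pvPart_nil (Bool.eq_false_iff.mpr h4) 4]
          by_cases h1 : pvT1.any pred = true
          · rw [if_pos h1, pvMax?_eq (c := 1)
              (by simp only [List.nil_append]; exact pvPart_mem h1 1)
              (by simpa only [List.nil_append] using pvPart_le (T := pvT1) (pred := pred) (le_refl (1 : Int)))]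
          · rw [if_neg h1, pvPart_nil (Bool.eq_false_iff.mpr h1) 1]
            simp [PySem.List.max?]

-- ===== VERDICT (by name: the statement is the Claim_ definition above) =====
theorem extract_emotion_intensity_spec : Claim_equal_extract_emotion_intensity := by
  intro b d p _
  unfold Spec_extract_emotion_intensity extract_emotion_intensity extract_emotion_intensity_alt
  exact pvCascade_eq (fun w => PySem.Chars.isIn w (PySem.Chars.lower (b.toList ++ [' '] ++ d.toList))) p
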